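-- pv_equiv track=rewrite | github.com/encukou/aoc | 2022/18/day.py | count_boundary_faces
-- ===== SOURCE A (Python) =====
-- import collections
--
-- def get_cube_faces(x, y, z):
--     """A cube face is represented by its orientation and starting point.
--
--     For example face ('xy', x, y, z) stretches between these points:
--     - x, y,   z
--     - x, y+1, z
--     - x, y,   z+1
--     - x, y+1, z+1
--     """
--     yield 'xy',  x,   y,   z
--     yield 'xy',  x,   y,   z+1
--
--     yield 'yz',  x,   y,   z
--     yield 'yz',  x+1, y,   z
--
--     yield 'xz',  x,   y,   z
--     yield 'xz',  x,   y+1, z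
--
-- def count_boundary_faces(cubes):
--     face_counter = collections.Counter()
--     for cube in list(cubes):
--         for face in get_cube_faces(*cube):
--             face_counter[face] += 1
--
--     # Only count faces that aren't duplicated
--     num_singles = 0
--     for face, count in face_counter.items():
--         if count == 1:
--             num_singles += 1
--     return num_singles
-- ===== SOURCE B (Python) =====
-- def count_boundary_faces(cubes):
--     # Sort-then-scan instead of a hash Counter: each face is packed into a
--     # single integer key, the keys are sorted, and one grouped pass counts
--     # the runs of length exactly 1.
--     SHIFT = 1 << 33
--     BASE = 1 << 34
--     keys = []
--     for x, y, z in list(cubes):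
--         for t, fx, fy, fz in (
--             (0, x, y, z), (0, x, y, z + 1),
--             (1, x, y, z), (1, x + 1, y, z),
--             (2, x, y, z), (2, x, y + 1, z),
--         ):
--             keys.append(((t * BASE + fx + SHIFT) * BASE + fy + SHIFT) * BASE + fz + SHIFT)
--     keys.sort()
--     num_singles = 0
--     prev = None
--     run = 0
--     for k in keys:
--         if k == prev:
--             run += 1
--         else:
--             if run == 1:
--                 num_singles += 1
--             prev = k
--             run = 1
--     if run == 1:
--         num_singles += 1
--     return num_singles
-- ===== Notes on version B (the rewrite author's own statement) =====
-- stated objective: alternative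
-- what changed: Replaces A's hash-table Counter over face tuples by a sort-then-scan: each face is packed into a single integer key, the key list is sorted, and one grouped pass over consecutive equal keys counts the runs of length exactly 1.
import Mathlib
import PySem

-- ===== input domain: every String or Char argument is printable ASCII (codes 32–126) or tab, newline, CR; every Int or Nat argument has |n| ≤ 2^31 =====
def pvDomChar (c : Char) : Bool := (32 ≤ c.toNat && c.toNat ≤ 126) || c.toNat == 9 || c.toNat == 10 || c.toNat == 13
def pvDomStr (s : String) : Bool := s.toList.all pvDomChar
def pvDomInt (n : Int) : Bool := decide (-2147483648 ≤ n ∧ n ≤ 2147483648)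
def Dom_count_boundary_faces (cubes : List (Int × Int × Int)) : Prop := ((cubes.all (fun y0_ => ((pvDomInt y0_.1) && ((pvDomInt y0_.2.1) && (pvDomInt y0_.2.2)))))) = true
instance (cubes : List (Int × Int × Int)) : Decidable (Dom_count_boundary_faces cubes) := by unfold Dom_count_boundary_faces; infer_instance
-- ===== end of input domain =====

-- B replaces A's hash-table Counter by a sort-then-scan over the faces packed
-- into single integer keys (count runs of length exactly 1); same result, a
-- genuinely different algorithm (objective: alternative).

-- ===== PORT A =====
def get_cube_faces (x y z : Int) : List (String × Int × Int × Int) :=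
  [("xy", x, y, z), ("xy", x, y, z + 1),
   ("yz", x, y, z), ("yz", x + 1, y, z),
   ("xz", x, y, z), ("xz", x, y + 1, z)]

def count_boundary_faces (cubes : List (Int × Int × Int)) : Int :=
  let face_counter : PySem.Dict (String × Int × Int × Int) Int :=
    cubes.foldl (fun d c =>
      (get_cube_faces c.1 c.2.1 c.2.2).foldl (fun d face => d.modify face 0 (· + 1)) d)
      PySem.Dict.empty
  face_counter.items.foldl
    (fun num_singles fc => if fc.2 == 1 then num_singles + 1 else num_singles) 0

-- ===== PORT B =====
def pvFaceQuads (x y z : Int) : List (Int × Int × Int × Int) :=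
  [(0, x, y, z), (0, x, y, z + 1),
   (1, x, y, z), (1, x + 1, y, z),
   (2, x, y, z), (2, x, y + 1, z)]

-- one iteration of B's grouped scan (k == prev / run / num_singles)
def pvScanStep (st : Option Int × Int × Int) (k : Int) : Option Int × Int × Int :=
  if some k == st.1 then (st.1, st.2.1 + 1, st.2.2)
  else (some k, 1, if st.2.1 == 1 then st.2.2 + 1 else st.2.2)

def count_boundary_faces_alt (cubes : List (Int × Int × Int)) : Int :=
  let keys : List Int :=
    cubes.foldl (fun ks c =>
      (pvFaceQuads c.1 c.2.1 c.2.2).foldl (fun ks q =>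
        ks ++ [((q.1 * 17179869184 + q.2.1 + 8589934592) * 17179869184
                  + q.2.2.1 + 8589934592) * 17179869184 + q.2.2.2 + 8589934592]) ks) []
  let sortedKeys := PySem.List.sorted keys (fun k => k) false
  let st := sortedKeys.foldl pvScanStep (none, 0, 0)
  if st.2.1 == 1 then st.2.2 + 1 else st.2.2

-- ===== PRECONDITION & SPEC =====
def Spec_count_boundary_faces (cubes : List (Int × Int × Int)) (out : Int) : Prop := out = count_boundary_faces_alt cubes
instance (cubes : List (Int × Int × Int)) (out : Int) : Decidable (Spec_count_boundary_faces cubes out) := by unfold Spec_count_boundary_faces; infer_instance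

-- ===== CLAIM (what is proved, stated in full; the proofs are below) =====
def Claim_equal_count_boundary_faces : Prop := ∀ (cubes : List (Int × Int × Int)), Dom_count_boundary_faces cubes → Spec_count_boundary_faces cubes (count_boundary_faces cubes)

-- ===== LEMMAS AND PROOFS =====

-- the flat list of all faces (A's representation)
def pvFl (cubes : List (Int × Int × Int)) : List (String × Int × Int × Int) :=
  cubes.flatMap (fun c => get_cube_faces c.1 c.2.1 c.2.2)

def pvPack (t x y z : Int) : Int :=
  ((t * 17179869184 + x + 8589934592) * 17179869184 + y + 8589934592) * 17179869184
    + z + 8589934592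

def pvEnc (f : String × Int × Int × Int) : Int :=
  pvPack (if f.1 == "xy" then 0 else if f.1 == "yz" then 1 else 2) f.2.1 f.2.2.1 f.2.2.2

-- number of values occurring exactly once in l
def pvN {α : Type} [BEq α] (l : List α) : Nat :=
  l.countP (fun u => l.count u == 1)

lemma pvN_perm {α : Type} [BEq α] {l m : List α} (h : l.Perm m) : pvN l = pvN m := by
  unfold pvN
  rw [h.countP_eq]
  exact List.countP_congr (fun u _ => by rw [h.count_eq])

lemma pvN_nodup_eq {α : Type} [BEq α] [LawfulBEq α] (d l : List α)
    (hd : d.Nodup) (hmem : ∀ a, a ∈ d ↔ a ∈ l) :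
    d.countP (fun u => l.count u == 1) = pvN l := by
  unfold pvN
  rw [List.countP_eq_length_filter, List.countP_eq_length_filter]
  have hfn : (l.filter (fun u => l.count u == 1)).Nodup := by
    rw [List.nodup_iff_count_le_one]
    intro a
    by_cases ha : a ∈ l.filter (fun u => l.count u == 1)
    · have h1 : l.count a = 1 := by
        have := List.of_mem_filter ha
        simpa using this
      have hle : (l.filter (fun u => l.count u == 1)).count a ≤ l.count a :=
        List.filter_sublist.count_le a
      omega
    · rw [List.count_eq_zero_of_not_mem ha]; omega
  have hperm : (d.filter (fun u => l.count u == 1)).Perm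
      (l.filter (fun u => l.count u == 1)) := by
    rw [List.perm_ext_iff_of_nodup (hd.filter _) hfn]
    intro a
    simp only [List.mem_filter]
    exact and_congr_left (fun _ => hmem a)
  exact hperm.length_eq

lemma count_map_enc {α β : Type} [BEq α] [LawfulBEq α] [BEq β] [LawfulBEq β]
    (φ : α → β) (l : List α)
    (hinj : ∀ f ∈ l, ∀ g ∈ l, φ f = φ g → f = g) :
    ∀ u ∈ l, (l.map φ).count (φ u) = l.count u := by
  intro u hu
  rw [List.count_eq_countP, List.count_eq_countP, List.countP_map]
  apply List.countP_congr
  intro x hx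
  simp only [Function.comp_apply, beq_iff_eq]
  exact ⟨fun h => hinj x hx u hu h, fun h => h ▸ rfl⟩

lemma pvN_map {α β : Type} [BEq α] [LawfulBEq α] [BEq β] [LawfulBEq β]
    (φ : α → β) (l : List α)
    (hinj : ∀ f ∈ l, ∀ g ∈ l, φ f = φ g → f = g) :
    pvN (l.map φ) = pvN l := by
  unfold pvN
  rw [List.countP_map]
  apply List.countP_congr
  intro u hu
  simp only [Function.comp_apply, beq_iff_eq]
  rw [count_map_enc φ l hinj u hu]

lemma pvN_replicate_append {α : Type} [BEq α] [LawfulBEq α]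
    (v : α) (n : Nat) (m : List α) (hn : 1 ≤ n) (hv : v ∉ m) :
    pvN (List.replicate n v ++ m) = (if n = 1 then 1 else 0) + pvN m := by
  unfold pvN
  rw [List.countP_append]
  have hcv : (List.replicate n v ++ m).count v = n := by
    rw [List.count_append, List.count_replicate, List.count_eq_zero_of_not_mem hv]
    simp
  have h1 : (List.replicate n v).countP
      (fun u => (List.replicate n v ++ m).count u == 1) = if n = 1 then 1 else 0 := by
    rw [List.countP_replicate, hcv]
    by_cases h : n = 1 <;> simp [h] <;> omega
  have h2 : m.countP (fun u => (List.replicate n v ++ m).count u == 1)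
      = m.countP (fun u => m.count u == 1) := by
    apply List.countP_congr
    intro u hum
    have huv : ¬ (v == u) = true := by
      intro h; exact hv ((beq_iff_eq.mp h) ▸ hum)
    rw [List.count_append, List.count_replicate, if_neg huv]
    simp
  rw [h1, h2]

-- ===== A-side characterisation =====
lemma a_eq (cubes : List (Int × Int × Int)) :
    count_boundary_faces cubes = (pvN (pvFl cubes) : Int) := by
  simp only [count_boundary_faces]
  have hcounter :
      cubes.foldl (fun d c =>
        (get_cube_faces c.1 c.2.1 c.2.2).foldl (fun d face => d.modify face 0 (· + 1)) d)
        PySem.Dict.empty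
      = PySem.Dict.counter (pvFl cubes) := by
    rw [PySem.Dict.counter_eq_foldl, pvFl, List.foldl_flatMap]
  simp only [hcounter, PySem.Dict.items_counter, List.foldl_map]
  rw [PySem.List.foldl_count_if (fun k => ((List.count k (pvFl cubes) : Int) == 1))]
  have : (PySem.Set.ofList (pvFl cubes)).countP
      (fun k => ((List.count k (pvFl cubes) : Int) == 1))
      = (PySem.Set.ofList (pvFl cubes)).countP
      (fun u => (pvFl cubes).count u == 1) := by
    apply List.countP_congr
    intro u _
    constructor <;> intro h <;> simp only [beq_iff_eq] at * <;> omega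
  rw [this, pvN_nodup_eq _ _ (PySem.Set.nodup_ofList _) (PySem.Set.mem_ofList _)]
  simp

-- ===== B-side characterisation =====
lemma keys_eq (cubes : List (Int × Int × Int)) : ∀ ks : List Int,
    cubes.foldl (fun ks c =>
      (pvFaceQuads c.1 c.2.1 c.2.2).foldl (fun ks q =>
        ks ++ [((q.1 * 17179869184 + q.2.1 + 8589934592) * 17179869184
                  + q.2.2.1 + 8589934592) * 17179869184 + q.2.2.2 + 8589934592]) ks) ks
    = ks ++ (pvFl cubes).map pvEnc := by
  induction cubes with
  | nil => intro ks; simp [pvFl]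
  | cons c rest ih =>
    intro ks
    rw [List.foldl_cons, ih]
    have : (pvFl (c :: rest)) = get_cube_faces c.1 c.2.1 c.2.2 ++ pvFl rest := by
      simp [pvFl]
    rw [this, List.map_append, ← List.append_assoc]
    congr 1
    simp [pvFaceQuads, get_cube_faces, pvEnc, pvPack]

def pvFlush (st : Option Int × Int × Int) : Int :=
  if st.2.1 == 1 then st.2.2 + 1 else st.2.2

lemma scan_go : ∀ (s : List Int), s.Pairwise (· ≤ ·) →
    ∀ (v : Int) (n : Nat) (acc : Int), 1 ≤ n → (∀ x ∈ s, v ≤ x) →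
    pvFlush (s.foldl pvScanStep (some v, (n : Int), acc))
      = acc + (pvN (List.replicate n v ++ s) : Int) := by
  intro s
  induction s with
  | nil =>
    intro _ v n acc hn _
    simp only [List.foldl_nil, pvFlush]
    have : pvN (List.replicate n v ++ ([] : List Int)) = if n = 1 then 1 else 0 := by
      unfold pvN
      rw [List.append_nil, List.countP_replicate, List.count_replicate]
      by_cases h : n = 1 <;> simp [h] <;> omega
    rw [this]
    by_cases h : n = 1 <;> simp [h] <;> omega
  | cons x t ih =>
    intro hpw v n acc hn hle
    have hxt : ∀ y ∈ t, x ≤ y := fun y hy => List.rel_of_pairwise_cons hpw hy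
    have hpt : t.Pairwise (· ≤ ·) := hpw.of_cons
    have hvx : v ≤ x := hle x List.mem_cons_self
    simp only [List.foldl_cons]
    by_cases hxv : x = v
    · subst hxv
      have hstep : pvScanStep (some x, (n : Int), acc) x
          = (some x, ((n + 1 : Nat) : Int), acc) := by
        simp [pvScanStep]
      rw [hstep, ih hpt x (n + 1) acc (by omega) hxt]
      congr 2
      apply pvN_perm
      rw [List.replicate_succ' (n := n)]
      rw [List.append_assoc]
      exact List.Perm.refl _
    · have hvlt : v < x := lt_of_le_of_ne hvx (fun h => hxv h.symm)
      have hvnot : v ∉ x :: t := by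
        intro hmem
        rcases List.mem_cons.mp hmem with h | h
        · exact hxv h.symm
        · exact absurd (hxt v h) (by omega)
      have hstep : pvScanStep (some v, (n : Int), acc) x
          = (some x, ((1 : Nat) : Int),
              if ((n : Int) == 1) = true then acc + 1 else acc) := by
        simp [pvScanStep, hxv]
      rw [hstep, ih hpt x 1 _ (by omega) hxt]
      rw [pvN_replicate_append v n (x :: t) hn hvnot]
      have hx1 : pvN (List.replicate 1 x ++ t) = pvN (x :: t) := by
        apply pvN_perm; simp
      rw [hx1]
      have hcond : (((n : Int)) == 1) = (decide (n = 1)) := by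
        by_cases h : n = 1 <;> simp [h] <;> omega
      rw [hcond]
      by_cases h : n = 1 <;> simp [h] <;> push_cast <;> ring

lemma b_eq (cubes : List (Int × Int × Int)) :
    count_boundary_faces_alt cubes = (pvN ((pvFl cubes).map pvEnc) : Int) := by
  simp only [count_boundary_faces_alt]
  rw [keys_eq cubes []]
  simp only [List.nil_append]
  set l := (pvFl cubes).map pvEnc with hl
  have hperm : (PySem.List.sorted l (fun k => k) false).Perm l :=
    PySem.List.sorted_perm l (fun k => k) false
  have hpw : (PySem.List.sorted l (fun k => k) false).Pairwise (· ≤ ·) := by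
    have := PySem.List.sorted_pairwise l (fun k => k)
    simpa using this
  rw [← pvN_perm hperm]
  show pvFlush ((PySem.List.sorted l (fun k => k) false).foldl pvScanStep (none, 0, 0))
      = (pvN (PySem.List.sorted l (fun k => k) false) : Int)
  cases hS : PySem.List.sorted l (fun k => k) false with
  | nil => simp [pvN, pvFlush]
  | cons v rest =>
    rw [hS] at hpw
    simp only [List.foldl_cons]
    have hstep : pvScanStep (none, 0, 0) v = (some v, ((1 : Nat) : Int), 0) := by
      simp [pvScanStep]
    rw [hstep, scan_go rest hpw.of_cons v 1 0 (by omega)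
      (fun y hy => List.rel_of_pairwise_cons hpw hy)]
    have hx1 : pvN (List.replicate 1 v ++ rest) = pvN (v :: rest) := by
      apply pvN_perm; simp
    rw [hx1]; ring

-- ===== injectivity of the packing on Dom-bounded faces =====
lemma enc_inj (cubes : List (Int × Int × Int)) (hdom : Dom_count_boundary_faces cubes) :
    ∀ f ∈ pvFl cubes, ∀ g ∈ pvFl cubes, pvEnc f = pvEnc g → f = g := by
  have hshape : ∀ f ∈ pvFl cubes,
      (f.1 = "xy" ∨ f.1 = "yz" ∨ f.1 = "xz") ∧
      (-2147483648 ≤ f.2.1 ∧ f.2.1 ≤ 2147483649) ∧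
      (-2147483648 ≤ f.2.2.1 ∧ f.2.2.1 ≤ 2147483649) ∧
      (-2147483648 ≤ f.2.2.2 ∧ f.2.2.2 ≤ 2147483649) := by
    intro f hf
    rw [pvFl, List.mem_flatMap] at hf
    obtain ⟨c, hc, hfc⟩ := hf
    unfold Dom_count_boundary_faces at hdom
    rw [List.all_eq_true] at hdom
    have hb := hdom c hc
    simp only [pvDomInt, Bool.and_eq_true, decide_eq_true_eq] at hb
    obtain ⟨⟨h1a, h1b⟩, ⟨h2a, h2b⟩, ⟨h3a, h3b⟩⟩ := hb
    simp only [get_cube_faces, List.mem_cons, List.not_mem_nil, or_false] at hfc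
    rcases hfc with h | h | h | h | h | h <;> subst h <;> dsimp only <;>
      refine ⟨by tauto, by constructor <;> omega, by constructor <;> omega,
        by constructor <;> omega⟩
  intro f hf g hg heq
  obtain ⟨t1, a1, b1, c1⟩ := f
  obtain ⟨t2, a2, b2, c2⟩ := g
  obtain ⟨ht1, ha1, hb1, hc1⟩ := hshape _ hf
  obtain ⟨ht2, ha2, hb2, hc2⟩ := hshape _ hg
  simp only at ht1 ht2 ha1 hb1 hc1 ha2 hb2 hc2
  unfold pvEnc pvPack at heq
  simp only at heq
  rcases ht1 with h1 | h1 | h1 <;> rcases ht2 with h2 | h2 | h2 <;>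
    subst h1 <;> subst h2 <;> simp only [beq_iff_eq, if_true, if_false,
      String.reduceEq, reduceIte] at heq <;>
    (try (exfalso; omega)) <;>
    (refine Prod.ext rfl (Prod.ext ?_ (Prod.ext ?_ ?_)) <;> simp <;> omega)

-- ===== VERDICT (by name: the statement is the Claim_ definition above) =====
theorem count_boundary_faces_spec : Claim_equal_count_boundary_faces := by
  intro cubes hdom
  unfold Spec_count_boundary_faces
  rw [a_eq, b_eq, pvN_map pvEnc (pvFl cubes) (enc_inj cubes hdom)]
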